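-- pv_equiv track=rewrite | github.com/gustavobastian/exercises-DASSOPG | class-1/Ejercicios_extras/6_3.py | inserChar
-- ===== SOURCE A (Python) =====
-- def inserChar(string, char, max):
--     s=""
--     count=0
--     for i in range (0, len(string)):
--         if (count<max):
--             s+=string[i]+str(char)
--             count+=1
--         else :
--             s+=string[i]
--
--     return s
-- ===== SOURCE B (Python) =====
-- def inserChar(string, char, max):
--     k = max if max > 0 else 0
--     head, tail = string[:k], string[k:]
--     return "".join(c + str(char) for c in head) + tail
-- ===== Notes on version B (the rewrite author's own statement) =====
-- stated objective: simpler
-- what changed: Replaces the counted per-character if/else loop with a clamped head/tail split: a join over the first max characters and the rest appended untouched, no count state.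
import Mathlib
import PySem

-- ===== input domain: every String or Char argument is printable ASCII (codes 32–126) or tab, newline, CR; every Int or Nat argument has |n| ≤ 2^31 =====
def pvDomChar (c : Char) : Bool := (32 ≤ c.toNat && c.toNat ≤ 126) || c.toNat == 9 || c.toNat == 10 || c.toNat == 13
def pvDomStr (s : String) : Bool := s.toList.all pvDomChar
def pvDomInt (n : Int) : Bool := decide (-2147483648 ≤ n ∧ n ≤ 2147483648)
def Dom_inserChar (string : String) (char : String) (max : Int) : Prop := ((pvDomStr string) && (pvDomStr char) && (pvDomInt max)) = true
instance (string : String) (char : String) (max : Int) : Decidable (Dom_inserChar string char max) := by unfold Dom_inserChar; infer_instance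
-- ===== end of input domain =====

-- ===== PORT A =====
-- A: for each character, append it plus char while count<max, tracking count.
def inserCharGo (cs : List Char) (count : Int) (max : Int) (ch : List Char) : List Char :=
  match cs with
  | [] => []
  | c :: rest =>
      if count < max then c :: (ch ++ inserCharGo rest (count + 1) max ch)
      else c :: inserCharGo rest count max ch

def inserChar (string : String) (char : String) (max : Int) : String :=
  String.mk (inserCharGo string.toList 0 max char.toList)

-- ===== PORT B =====
-- B: split at clamped max; join c+char over the head, append the untouched tail.
def inserChar_alt (string : String) (char : String) (max : Int) : String :=
  let k := min string.toList.length (if 0 < max then max.toNat else 0)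
  String.mk ((string.toList.take k).flatMap (fun c => c :: char.toList) ++ string.toList.drop k)

-- ===== PRECONDITION & SPEC =====
def Spec_inserChar (string : String) (char : String) (max : Int) (out : String) : Prop := out = inserChar_alt string char max
instance (string : String) (char : String) (max : Int) (out : String) : Decidable (Spec_inserChar string char max out) := by unfold Spec_inserChar; infer_instance

-- ===== CLAIM (what is proved, stated in full; the proofs are below) =====
def Claim_equal_inserChar : Prop := ∀ (string : String) (char : String) (max : Int), Dom_inserChar string char max → Spec_inserChar string char max (inserChar string char max)

-- ===== LEMMAS AND PROOFS =====

theorem inserCharGo_eq (cs : List Char) (ch : List Char) (max : Int) :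
    ∀ count : Int,
      inserCharGo cs count max ch =
        (cs.take (min cs.length (max - count).toNat)).flatMap (fun c => c :: ch) ++
          cs.drop (min cs.length (max - count).toNat) := by
  induction cs with
  | nil => intro count; simp [inserCharGo]
  | cons c rest ih =>
      intro count
      by_cases h : count < max
      · have hk : min (c :: rest).length (max - count).toNat
            = min rest.length (max - (count + 1)).toNat + 1 := by
          simp only [List.length_cons]; omega
        rw [hk]
        simp [inserCharGo, h, ih (count + 1)]
      · have hk : min (c :: rest).length (max - count).toNat = 0 := by
          simp only [List.length_cons]; omega
        have hk' : ∀ l : List Char, min l.length (max - count).toNat = 0 := by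
          intro l; omega
        have hrest := ih count
        rw [hk' rest] at hrest
        rw [hk]
        simp [inserCharGo, h, hrest]

-- ===== VERDICT (by name: the statement is the Claim_ definition above) =====
theorem inserChar_spec : Claim_equal_inserChar := by
  intro string char max _
  unfold Spec_inserChar inserChar inserChar_alt
  rw [inserCharGo_eq string.toList char.toList max 0]
  have : (max - 0).toNat = (if 0 < max then max.toNat else 0) := by split_ifs with h <;> omega
  rw [this]
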